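-- pv_equiv track=rewrite | github.com/rahulshettyme/Data-Generate | Manager/script_generator.py | clean_ai_headers
-- ===== SOURCE A (Python) =====
-- def clean_ai_headers(script_content):
--     """Removes old AI status headers and 'Original Code' markers from the script."""
--     lines = script_content.splitlines()
--     cleaned_lines = []
--
--     # We want to remove any BLOCK of lines at the start that look like:
--     # # AI Generated...
--     # # AI Updated...
--     # # AI Generation failed...
--     # # Original Code:
--     # AND any empty lines mixed in with them.
--     # Once we hit "real" code (imports, comments that aren't these specific headers), we stop stripping.
--
--     stripping = True
--     for line in lines:
--         stripped_line = line.strip()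
--         if stripping:
--             if not stripped_line: continue # Skip empty leading lines
--
--             # Check for AI Headers
--             lower_line = stripped_line.lower()
--             if lower_line.startswith("# ai generated"): continue
--             if lower_line.startswith("# ai updated"): continue
--             if lower_line.startswith("# ai generation failed"): continue
--             if lower_line.startswith("# ai update failed"): continue
--             if lower_line.startswith("# original code:"): continue
--
--             # If it's a comment starting with # and subsequent indentation error lines (e.g. from previous bad updates)
--             # This is riskier but "AI Update Failed" usually adds a block.
--             # Let's stick to the specific headers for safety.
--
--             # If line starts with "  " (indent) and we just saw an error header, it's likely part of the error JSON
--             # But the cleaner logic above processes line by line independently.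
--             # A simple heuristic: If it starts with # and looks like json or error message?
--             # User requirement: "remove old and show recent".
--
--             # Stop stripping if we hit metadata like EXPECTED_INPUT_COLUMNS or imports
--             # Stop stripping if we hit metadata like EXPECTED_INPUT_COLUMNS or imports
--             if "EXPECTED_INPUT_COLUMNS" in line:
--                  # Duplicate logic: The main block re-adds this at the top.
--                  # So we should STRIP old ones to prevent accumulation.
--                  continue
--
--             if stripped_line.startswith("#"):
--                  # Check if it's a "bad" header we missed or a "good" comment
--                  # Good comments: # Description, # Step 1, etc.
--                  # Bad comments: #   "error": ... (indented error trace)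
--                  if '"error":' in line or '"code":' in line: continue
--                  pass
--             else:
--                  # Real code or non-comment
--                  stripping = False
--                  cleaned_lines.append(line)
--         else:
--             cleaned_lines.append(line)
--
--     return "\n".join(cleaned_lines)
-- ===== SOURCE B (Python) =====
-- def clean_ai_headers(script_content):
--     """Removes old AI status headers and 'Original Code' markers from the script."""
--     # A line is dropped by the stripping phase iff it is blank, mentions
--     # EXPECTED_INPUT_COLUMNS, or is a '#' comment (all AI-header prefixes start with '#').
--     def is_header(line):
--         stripped = line.strip()
--         return (not stripped) or ("EXPECTED_INPUT_COLUMNS" in line) or stripped.startswith("#")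
--
--     lines = script_content.splitlines()
--     while lines and is_header(lines[0]):
--         lines = lines[1:]
--     return "\n".join(lines)
-- ===== Notes on version B (the rewrite author's own statement) =====
-- stated objective: simpler
-- what changed: Replaced the flag-threaded append loop, whose five AI-header prefix tests are all subsumed by its general comment-prefix test, with a single is_header predicate and a drop-leading-lines loop followed by one join of the unchanged tail.
import Mathlib
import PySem

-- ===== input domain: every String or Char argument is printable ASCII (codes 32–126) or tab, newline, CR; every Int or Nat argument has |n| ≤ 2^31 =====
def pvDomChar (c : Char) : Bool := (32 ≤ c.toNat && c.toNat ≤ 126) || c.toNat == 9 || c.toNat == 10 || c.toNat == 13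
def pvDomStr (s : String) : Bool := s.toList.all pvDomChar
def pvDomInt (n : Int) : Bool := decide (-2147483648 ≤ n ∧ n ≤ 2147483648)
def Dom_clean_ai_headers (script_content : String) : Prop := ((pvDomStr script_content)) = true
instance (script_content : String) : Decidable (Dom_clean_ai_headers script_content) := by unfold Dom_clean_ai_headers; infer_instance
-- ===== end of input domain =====

-- B replaces A's flag-threaded append loop by one is_header predicate (which subsumes
-- A's five AI-header prefix tests) and a drop-leading-lines loop plus a single join (simpler).


-- ===== PORT A =====
-- literal transliteration of A's for-loop: state = (stripping flag, accumulated lines)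
def pvCleanLoopA : List String → Bool → List String → List String
  | [], _, acc => acc
  | line :: rest, stripping, acc =>
    if stripping then
      let stripped_line := PySem.Str.strip line
      if stripped_line = "" then pvCleanLoopA rest true acc            -- continue
      else
        let lower_line := PySem.Str.lower stripped_line
        if PySem.Str.startswith lower_line "# ai generated" then pvCleanLoopA rest true acc
        else if PySem.Str.startswith lower_line "# ai updated" then pvCleanLoopA rest true acc
        else if PySem.Str.startswith lower_line "# ai generation failed" then pvCleanLoopA rest true acc
        else if PySem.Str.startswith lower_line "# ai update failed" then pvCleanLoopA rest true acc
        else if PySem.Str.startswith lower_line "# original code:" then pvCleanLoopA rest true acc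
        else if PySem.Str.isIn "EXPECTED_INPUT_COLUMNS" line then pvCleanLoopA rest true acc
        else if PySem.Str.startswith stripped_line "#" then
          if PySem.Str.isIn "\"error\":" line || PySem.Str.isIn "\"code\":" line then
            pvCleanLoopA rest true acc                                  -- continue
          else
            pvCleanLoopA rest true acc                                  -- pass: falls off the loop body
        else
          pvCleanLoopA rest false (acc ++ [line])                       -- stripping = False; append
    else
      pvCleanLoopA rest stripping (acc ++ [line])

def clean_ai_headers (script_content : String) : String :=
  PySem.Str.join "\n" (pvCleanLoopA (PySem.Str.splitlines script_content) true [])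

-- ===== PORT B =====
def pvIsHeader (line : String) : Bool :=
  let stripped := PySem.Str.strip line
  stripped == "" || PySem.Str.isIn "EXPECTED_INPUT_COLUMNS" line
    || PySem.Str.startswith stripped "#"

-- the while-loop of Source B: pop the first line while it is a header line
def pvDropHeaders : List String → List String
  | [] => []
  | line :: rest => if pvIsHeader line then pvDropHeaders rest else line :: rest

def clean_ai_headers_alt (script_content : String) : String :=
  PySem.Str.join "\n" (pvDropHeaders (PySem.Str.splitlines script_content))

-- ===== PRECONDITION & SPEC =====
def Spec_clean_ai_headers (script_content : String) (out : String) : Prop := out = clean_ai_headers_alt script_content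
instance (script_content : String) (out : String) : Decidable (Spec_clean_ai_headers script_content out) := by unfold Spec_clean_ai_headers; infer_instance

-- ===== CLAIM (what is proved, stated in full; the proofs are below) =====
def Claim_equal_clean_ai_headers : Prop := ∀ (script_content : String), Dom_clean_ai_headers script_content → Spec_clean_ai_headers script_content (clean_ai_headers script_content)

-- ===== LEMMAS AND PROOFS =====

-- lower-casing only changes alphabetic characters, so a lower-cased '#' came from '#'
theorem pv_lowerChar_hash {c : Char} (h : PySem.Chars.lowerChar c = '#') : c = '#' := by
  by_cases hu : PySem.Chars.isupper c = true
  · exfalso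
    unfold PySem.Chars.lowerChar at h
    rw [if_pos hu] at h
    unfold PySem.Chars.isupper at hu
    have hv : 'A' ≤ c ∧ c ≤ 'Z' := by simpa [decide_eq_true_eq] using hu
    have hA : 65 ≤ c.toNat := by
      have := hv.1; simp [Char.le_def] at this; exact this
    have hZ : c.toNat ≤ 90 := by
      have := hv.2; simp [Char.le_def] at this; exact this
    have h35 : (Char.ofNat (c.toNat + 32)).toNat = 35 := by rw [h]; decide
    have hval : (c.toNat + 32).isValidChar := Or.inl (by omega)
    rw [Char.toNat_ofNat, if_pos hval] at h35
    omega
  · unfold PySem.Chars.lowerChar at h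
    rw [if_neg hu] at h
    exact h

-- a '#'-headed prefix of the lower-cased line forces the line itself to start with '#'
theorem pv_lower_prefix (cs : List Char) (p : List Char) (hp : p.head? = some '#')
    (h : PySem.Chars.startswith (PySem.Chars.lower cs) p = true) :
    PySem.Chars.startswith cs ['#'] = true := by
  cases p with
  | nil => simp at hp
  | cons a b =>
    have ha : a = '#' := by simpa using hp
    cases cs with
    | nil => simp [PySem.Chars.lower, PySem.Chars.startswith] at h
    | cons c t =>
      simp only [PySem.Chars.lower, PySem.Chars.startswith, List.map_cons,
        List.isPrefixOf, Bool.and_eq_true, beq_iff_eq] at h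
      have hc : c = '#' := pv_lowerChar_hash (by rw [← h.1, ha])
      simp [PySem.Chars.startswith, List.isPrefixOf, hc]

-- any of A's "# ai …" / "# original code:" prefix tests implies the stripped line starts with '#'
theorem pv_ai_imp_hash (t : String) (p : String) (hp : p.toList.head? = some '#')
    (h : PySem.Str.startswith (PySem.Str.lower t) p = true) :
    PySem.Str.startswith t "#" = true := by
  simp only [PySem.Str.startswith, PySem.Str.lower, String.toList_ofList] at h
  have := pv_lower_prefix t.toList p.toList hp h
  simpa [PySem.Str.startswith] using this

-- contrapositive form used on kept lines
theorem pv_ai_false (l : String)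
    (hhash : PySem.Str.startswith (PySem.Str.strip l) "#" = false)
    (p : String) (hp : p.toList.head? = some '#') :
    PySem.Str.startswith (PySem.Str.lower (PySem.Str.strip l)) p = false := by
  cases h' : PySem.Str.startswith (PySem.Str.lower (PySem.Str.strip l)) p
  · rfl
  · rw [pv_ai_imp_hash _ _ hp h'] at hhash; exact hhash

-- one loop iteration on a header line: everything is dropped, the flag stays on
theorem pvA_step_drop (l : String) (rest acc : List String) (h : pvIsHeader l = true) :
    pvCleanLoopA (l :: rest) true acc = pvCleanLoopA rest true acc := by
  rw [pvCleanLoopA]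
  simp only [if_true]
  by_cases h1 : PySem.Str.strip l = ""
  · rw [if_pos h1]
  · rw [if_neg h1]
    by_cases h2 : PySem.Str.startswith (PySem.Str.lower (PySem.Str.strip l)) "# ai generated" = true
    · rw [if_pos h2]
    · rw [if_neg h2]
      by_cases h3 : PySem.Str.startswith (PySem.Str.lower (PySem.Str.strip l)) "# ai updated" = true
      · rw [if_pos h3]
      · rw [if_neg h3]
        by_cases h4 : PySem.Str.startswith (PySem.Str.lower (PySem.Str.strip l)) "# ai generation failed" = true
        · rw [if_pos h4]
        · rw [if_neg h4]
          by_cases h5 : PySem.Str.startswith (PySem.Str.lower (PySem.Str.strip l)) "# ai update failed" = true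
          · rw [if_pos h5]
          · rw [if_neg h5]
            by_cases h6 : PySem.Str.startswith (PySem.Str.lower (PySem.Str.strip l)) "# original code:" = true
            · rw [if_pos h6]
            · rw [if_neg h6]
              by_cases h7 : PySem.Str.isIn "EXPECTED_INPUT_COLUMNS" l = true
              · rw [if_pos h7]
              · rw [if_neg h7]
                by_cases h8 : PySem.Str.startswith (PySem.Str.strip l) "#" = true
                · rw [if_pos h8, ite_self]
                · exfalso
                  simp only [pvIsHeader, Bool.or_eq_true, beq_iff_eq] at h
                  rcases h with (h | h) | h
                  · exact h1 h
                  · exact h7 h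
                  · exact h8 h

-- one loop iteration on a non-header line: the line is kept and the flag turns off
theorem pvA_step_keep (l : String) (rest acc : List String)
    (hne : ¬ (PySem.Str.strip l = ""))
    (hexp : PySem.Str.isIn "EXPECTED_INPUT_COLUMNS" l = false)
    (hhash : PySem.Str.startswith (PySem.Str.strip l) "#" = false) :
    pvCleanLoopA (l :: rest) true acc = pvCleanLoopA rest false (acc ++ [l]) := by
  have a2 := pv_ai_false l hhash "# ai generated" (by decide)
  have a3 := pv_ai_false l hhash "# ai updated" (by decide)
  have a4 := pv_ai_false l hhash "# ai generation failed" (by decide)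
  have a5 := pv_ai_false l hhash "# ai update failed" (by decide)
  have a6 := pv_ai_false l hhash "# original code:" (by decide)
  rw [pvCleanLoopA]
  simp only [if_true, if_neg hne, a2, a3, a4, a5, a6, hexp, hhash,
    Bool.false_eq_true, if_false]

-- once the stripping flag is off, A appends every remaining line unchanged
theorem pvA_false (lines : List String) (acc : List String) :
    pvCleanLoopA lines false acc = acc ++ lines := by
  induction lines generalizing acc with
  | nil => simp [pvCleanLoopA]
  | cons l rest ih => simp [pvCleanLoopA, ih]

-- while stripping, A drops exactly the leading pvIsHeader lines
theorem pvA_true (lines : List String) (acc : List String) :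
    pvCleanLoopA lines true acc = acc ++ pvDropHeaders lines := by
  induction lines generalizing acc with
  | nil => simp [pvCleanLoopA, pvDropHeaders]
  | cons l rest ih =>
    by_cases hH : pvIsHeader l = true
    · rw [pvA_step_drop l rest acc hH, ih, pvDropHeaders, if_pos hH]
    · have hfacts := hH
      rw [Bool.not_eq_true] at hfacts
      simp only [pvIsHeader, Bool.or_eq_false_iff, beq_eq_false_iff_ne] at hfacts
      obtain ⟨⟨hne, hexp⟩, hhash⟩ := hfacts
      rw [pvA_step_keep l rest acc hne hexp hhash, pvA_false,
        pvDropHeaders, if_neg hH]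
      simp

-- ===== VERDICT (by name: the statement is the Claim_ definition above) =====
theorem clean_ai_headers_spec : Claim_equal_clean_ai_headers := by
  intro s _
  show clean_ai_headers s = clean_ai_headers_alt s
  unfold clean_ai_headers clean_ai_headers_alt
  rw [pvA_true]
  rfl
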